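-- pv_equiv track=rewrite | github.com/honu-shell-utions/python | sandbox/xx_project_euler/701-750/730_shifted_pythag_triples02.py | sols
-- ===== SOURCE A (Python) =====
-- def sols(a,b,c,P):
--    """ all (generalized) solutions with starting triple (a,b,c) and c<=P """
--    if c>P: return []
--    S = [(a,b,c)]
--    S += sols(-2*a+b+2*c,-a+2*b+2*c,-2*a+2*b+3*c,P);
--    if a>0:
--       S += sols(2*a+b+2*c,a+2*b+2*c,2*a+2*b+3*c,P);
--    if (a==0 and b>0 and b<c) or (a>0 and b>a):
--       S += sols(a-2*b+2*c,2*a-b+2*c,2*a-2*b+3*c,P);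
--    return S
-- ===== SOURCE B (Python) =====
-- def sols(a, b, c, P):
--     """ all (generalized) solutions with starting triple (a,b,c) and c<=P """
--     stack = [(a, b, c)]
--     res = []
--     while stack:
--         x, y, z = stack.pop()
--         if z > P:
--             continue
--         res.append((x, y, z))
--         children = [(-2*x + y + 2*z, -x + 2*y + 2*z, -2*x + 2*y + 3*z)]
--         if x > 0:
--             children.append((2*x + y + 2*z, x + 2*y + 2*z, 2*x + 2*y + 3*z))
--         if (x == 0 and 0 < y < z) or (x > 0 and y > x):
--             children.append((x - 2*y + 2*z, 2*x - y + 2*z, 2*x - 2*y + 3*z))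
--         stack.extend(reversed(children))
--     return res
-- ===== Notes on version B (the rewrite author's own statement) =====
-- stated objective: alternative
-- what changed: Replaced A's recursion by an iterative DFS with an explicit stack: pop a triple, skip it if c>P, otherwise record it and push its children in reverse order so they are popped in A's preorder.
-- outside the precondition, e.g. on sols(-1, 0, 0, 0): A returns [(-1, 0, 0)], B returns [(-1, 0, 0)]
import Mathlib
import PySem

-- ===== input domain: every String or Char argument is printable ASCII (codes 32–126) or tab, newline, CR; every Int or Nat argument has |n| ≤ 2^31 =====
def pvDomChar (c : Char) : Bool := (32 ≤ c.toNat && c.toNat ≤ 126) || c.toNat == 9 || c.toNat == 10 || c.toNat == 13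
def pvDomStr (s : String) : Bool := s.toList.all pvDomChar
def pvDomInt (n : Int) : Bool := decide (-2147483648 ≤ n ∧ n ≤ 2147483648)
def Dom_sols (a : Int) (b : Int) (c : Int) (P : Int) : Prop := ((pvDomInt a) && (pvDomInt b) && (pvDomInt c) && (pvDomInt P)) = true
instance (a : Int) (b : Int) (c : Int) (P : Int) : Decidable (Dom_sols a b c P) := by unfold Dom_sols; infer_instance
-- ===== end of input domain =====

-- B replaces A's recursion by an iterative DFS with an explicit stack (pop-time c>P test,
-- children pushed in reverse so they are popped in A's preorder); objective: alternative.

-- ===== PORT A =====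
-- A is recursive; the recursion need not terminate for arbitrary Int inputs, so the port
-- carries a fuel guard (Nat argument); Pre_sols guarantees fuel (P+1-c).toNat suffices.
def solsF : Nat → Int → Int → Int → Int → List (Int × Int × Int)
  | 0, _, _, _, _ => []
  | n+1, a, b, c, P =>
    if P < c then []
    else
      let S := [(a, b, c)] ++ solsF n (-2*a+b+2*c) (-a+2*b+2*c) (-2*a+2*b+3*c) P
      let S := if 0 < a then S ++ solsF n (2*a+b+2*c) (a+2*b+2*c) (2*a+2*b+3*c) P else S
      let S := if (a = 0 ∧ 0 < b ∧ b < c) ∨ (0 < a ∧ a < b) then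
                 S ++ solsF n (a-2*b+2*c) (2*a-b+2*c) (2*a-2*b+3*c) P
               else S
      S

def sols (a : Int) (b : Int) (c : Int) (P : Int) : List (Int × Int × Int) :=
  solsF ((P + 1 - c).toNat) a b c P

-- ===== PORT B =====
-- Python stack has its top at the end; the Lean list keeps the top at the head, so
-- stack.pop() = head and stack.extend(reversed(children)) = children ++ rest.
def loopB : Nat → List (Int × Int × Int) → Int → List (Int × Int × Int) → List (Int × Int × Int)
  | 0, _, _, res => res
  | n+1, stack, P, res =>
    match stack with
    | [] => res
    | (x, y, z) :: rest =>
      if P < z then loopB n rest P res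
      else
        let children := [(-2*x+y+2*z, -x+2*y+2*z, -2*x+2*y+3*z)]
        let children := if 0 < x then children ++ [(2*x+y+2*z, x+2*y+2*z, 2*x+2*y+3*z)] else children
        let children := if (x = 0 ∧ 0 < y ∧ y < z) ∨ (0 < x ∧ x < y) then
                          children ++ [(x-2*y+2*z, 2*x-y+2*z, 2*x-2*y+3*z)]
                        else children
        loopB n (children ++ rest) P (res ++ [(x, y, z)])

def sols_alt (a : Int) (b : Int) (c : Int) (P : Int) : List (Int × Int × Int) :=
  loopB (4 ^ (P + 1 - c).toNat) [(a, b, c)] P []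

-- ===== PRECONDITION & SPEC =====
-- Pre_sols excludes starting triples with c ≤ P outside the invariant 0 ≤ a < c, 0 < b < c:
-- on such inputs A's recursion may fail to terminate (RecursionError), and the fueled ports
-- cannot follow it; on a few of them A does return quickly and B returns the same value.
def Pre_sols (a : Int) (b : Int) (c : Int) (P : Int) : Prop :=
  P < c ∨ (0 ≤ a ∧ a < c ∧ 0 < b ∧ b < c)
instance (a : Int) (b : Int) (c : Int) (P : Int) : Decidable (Pre_sols a b c P) := by
  unfold Pre_sols; infer_instance

def pvWitness_sols : Int × Int × Int × Int := (3, 4, 5, 40)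

def Spec_sols (a : Int) (b : Int) (c : Int) (P : Int) (out : List (Int × Int × Int)) : Prop := out = sols_alt a b c P
instance (a : Int) (b : Int) (c : Int) (P : Int) (out : List (Int × Int × Int)) : Decidable (Spec_sols a b c P out) := by unfold Spec_sols; infer_instance

-- ===== CLAIM (what is proved, stated in full; the proofs are below) =====
def Claim_equal_sols : Prop := ∀ (a : Int) (b : Int) (c : Int) (P : Int), Dom_sols a b c P → Pre_sols a b c P → Spec_sols a b c P (sols a b c P)

-- ===== LEMMAS AND PROOFS =====

-- the invariant preserved by all three children, with strict growth of c
def InvT (a b c : Int) : Prop := 0 ≤ a ∧ a < c ∧ 0 < b ∧ b < c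

lemma inv_c1 (a b c : Int) (h : InvT a b c) :
    InvT (-2*a+b+2*c) (-a+2*b+2*c) (-2*a+2*b+3*c) ∧ c + 1 ≤ -2*a+2*b+3*c := by
  unfold InvT at *; omega

lemma inv_c2 (a b c : Int) (h : InvT a b c) (ha : 0 < a) :
    InvT (2*a+b+2*c) (a+2*b+2*c) (2*a+2*b+3*c) ∧ c + 1 ≤ 2*a+2*b+3*c := by
  unfold InvT at *; omega

lemma inv_c3 (a b c : Int) (h : InvT a b c) :
    InvT (a-2*b+2*c) (2*a-b+2*c) (2*a-2*b+3*c) ∧ c + 1 ≤ 2*a-2*b+3*c := by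
  unfold InvT at *; omega

lemma solsF_gt {n : Nat} {a b c P : Int} (h : P < c) : solsF n a b c P = [] := by
  cases n <;> simp [solsF, h]

-- fuel monotonicity: under the invariant any sufficient fuel gives the same value
lemma solsF_mono (d : Nat) : ∀ (a b c P : Int) (n n' : Nat), InvT a b c →
    (P + 1 - c).toNat ≤ d → (P + 1 - c).toNat ≤ n → (P + 1 - c).toNat ≤ n' →
    solsF n a b c P = solsF n' a b c P := by
  induction d with
  | zero =>
    intro a b c P n n' hI hd hn hn'
    have hc : P < c := by omega
    rw [solsF_gt hc, solsF_gt hc]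
  | succ d ih =>
    intro a b c P n n' hI hd hn hn'
    by_cases hc : P < c
    · rw [solsF_gt hc, solsF_gt hc]
    · have hm : 1 ≤ (P + 1 - c).toNat := by omega
      obtain ⟨k, rfl⟩ : ∃ k, n = k + 1 := ⟨n - 1, by omega⟩
      obtain ⟨k', rfl⟩ : ∃ k', n' = k' + 1 := ⟨n' - 1, by omega⟩
      have h1 := inv_c1 a b c hI
      have h3 := inv_c3 a b c hI
      simp only [solsF, hc, if_false]
      have e1 : solsF k (-2*a+b+2*c) (-a+2*b+2*c) (-2*a+2*b+3*c) P
              = solsF k' (-2*a+b+2*c) (-a+2*b+2*c) (-2*a+2*b+3*c) P :=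
        ih _ _ _ _ _ _ h1.1 (by omega) (by omega) (by omega)
      have e3 : solsF k (a-2*b+2*c) (2*a-b+2*c) (2*a-2*b+3*c) P
              = solsF k' (a-2*b+2*c) (2*a-b+2*c) (2*a-2*b+3*c) P :=
        ih _ _ _ _ _ _ h3.1 (by omega) (by omega) (by omega)
      by_cases ha : 0 < a
      · have h2 := inv_c2 a b c hI ha
        have e2 : solsF k (2*a+b+2*c) (a+2*b+2*c) (2*a+2*b+3*c) P
                = solsF k' (2*a+b+2*c) (a+2*b+2*c) (2*a+2*b+3*c) P :=
          ih _ _ _ _ _ _ h2.1 (by omega) (by omega) (by omega)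
        rw [e1, e2, e3]
      · rw [e1, e3]
        simp [ha]

def costT (t : Int × Int × Int) (P : Int) : Nat := 4 ^ ((P + 1 - t.2.2).toNat)

lemma loopB_spec (n : Nat) : ∀ (stack : List (Int × Int × Int)) (P : Int) (res : List (Int × Int × Int)),
    (∀ t ∈ stack, P < t.2.2 ∨ InvT t.1 t.2.1 t.2.2) →
    (stack.map (fun t => costT t P)).sum ≤ n →
    loopB n stack P res
      = res ++ (stack.map (fun t => solsF ((P + 1 - t.2.2).toNat) t.1 t.2.1 t.2.2 P)).flatten := by
  induction n using Nat.strong_induction_on with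
  | _ n ih =>
    intro stack P res hpre hsum
    match stack with
    | [] => cases n <;> simp [loopB]
    | (x, y, z) :: rest =>
      have hcost : 1 ≤ costT (x, y, z) P := Nat.one_le_pow _ _ (by norm_num)
      simp only [List.map_cons, List.sum_cons] at hsum
      obtain ⟨k, rfl⟩ : ∃ k, n = k + 1 := ⟨n - 1, by omega⟩
      have hrest : ∀ t ∈ rest, P < t.2.2 ∨ InvT t.1 t.2.1 t.2.2 :=
        fun t ht => hpre t (by simp [ht])
      by_cases hz : P < z
      · simp only [loopB, hz, if_true]
        rw [ih k (by omega) rest P res hrest (by omega)]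
        simp [solsF_gt hz]
      · have hI : InvT x y z := by
          rcases hpre (x, y, z) (by simp) with h | h
          · exact absurd h hz
          · exact h
        have hm : 1 ≤ (P + 1 - z).toNat := by
          unfold InvT at hI; omega
        obtain ⟨mm, hmm⟩ : ∃ mm, (P + 1 - z).toNat = mm + 1 := ⟨(P + 1 - z).toNat - 1, by omega⟩
        have h1 := inv_c1 x y z hI
        have h3 := inv_c3 x y z hI
        have hcz : costT (x, y, z) P = 4 ^ (mm + 1) := by simp [costT, hmm]
        have he1 : (P + 1 - (-2*x+2*y+3*z)).toNat ≤ mm := by have := h1.2; omega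
        have he3 : (P + 1 - (2*x-2*y+3*z)).toNat ≤ mm := by have := h3.2; omega
        have hb1 : costT (-2*x+y+2*z, -x+2*y+2*z, -2*x+2*y+3*z) P ≤ 4 ^ mm :=
          Nat.pow_le_pow_right (by norm_num) he1
        have hb3 : costT (x-2*y+2*z, 2*x-y+2*z, 2*x-2*y+3*z) P ≤ 4 ^ mm :=
          Nat.pow_le_pow_right (by norm_num) he3
        have hpow : 3 * 4 ^ mm + 1 ≤ 4 ^ (mm + 1) := by
          have : 1 ≤ 4 ^ mm := Nat.one_le_pow _ _ (by norm_num)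
          rw [pow_succ]; omega
        have main : ∀ (ch : List (Int × Int × Int)),
            (∀ t ∈ ch, InvT t.1 t.2.1 t.2.2) →
            (ch.map (fun t => costT t P)).sum ≤ 3 * 4 ^ mm →
            loopB k (ch ++ rest) P (res ++ [(x, y, z)])
              = res ++ [(x, y, z)]
                ++ (ch.map (fun t => solsF ((P + 1 - t.2.2).toNat) t.1 t.2.1 t.2.2 P)).flatten
                ++ (rest.map (fun t => solsF ((P + 1 - t.2.2).toNat) t.1 t.2.1 t.2.2 P)).flatten := by
          intro ch hchI hchc
          rw [ih k (by omega) (ch ++ rest) P (res ++ [(x, y, z)])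
              (by intro t ht; rcases List.mem_append.mp ht with h | h
                  · exact Or.inr (hchI t h)
                  · exact hrest t h)
              (by rw [List.map_append, List.sum_append]; omega)]
          simp
        have r1 : solsF mm (-2*x+y+2*z) (-x+2*y+2*z) (-2*x+2*y+3*z) P
                = solsF ((P + 1 - (-2*x+2*y+3*z)).toNat) (-2*x+y+2*z) (-x+2*y+2*z) (-2*x+2*y+3*z) P :=
          solsF_mono mm _ _ _ _ _ _ h1.1 he1 (by omega) (by omega)
        have r3 : solsF mm (x-2*y+2*z) (2*x-y+2*z) (2*x-2*y+3*z) P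
                = solsF ((P + 1 - (2*x-2*y+3*z)).toNat) (x-2*y+2*z) (2*x-y+2*z) (2*x-2*y+3*z) P :=
          solsF_mono mm _ _ _ _ _ _ h3.1 he3 (by omega) (by omega)
        simp only [loopB, hz, if_false, List.map_cons, List.flatten_cons]
        by_cases hx : 0 < x <;>
          by_cases hcond : (x = 0 ∧ 0 < y ∧ y < z) ∨ (0 < x ∧ x < y)
        · -- children [c1, c2, c3]
          have h2 := inv_c2 x y z hI hx
          have he2 : (P + 1 - (2*x+2*y+3*z)).toNat ≤ mm := by have := h2.2; omega
          have hb2 : costT (2*x+y+2*z, x+2*y+2*z, 2*x+2*y+3*z) P ≤ 4 ^ mm :=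
            Nat.pow_le_pow_right (by norm_num) he2
          have r2 : solsF mm (2*x+y+2*z) (x+2*y+2*z) (2*x+2*y+3*z) P
                  = solsF ((P + 1 - (2*x+2*y+3*z)).toNat) (2*x+y+2*z) (x+2*y+2*z) (2*x+2*y+3*z) P :=
            solsF_mono mm _ _ _ _ _ _ h2.1 he2 (by omega) (by omega)
          rw [if_pos hcond, if_pos hx]
          have hmain := main [(-2*x+y+2*z, -x+2*y+2*z, -2*x+2*y+3*z), (2*x+y+2*z, x+2*y+2*z, 2*x+2*y+3*z), (x-2*y+2*z, 2*x-y+2*z, 2*x-2*y+3*z)]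
              (by intro t ht
                  simp only [List.mem_cons, List.not_mem_nil, or_false] at ht
                  rcases ht with h | h | h <;> subst h
                  · exact h1.1
                  · exact h2.1
                  · exact h3.1)
              (by simp only [List.map_cons, List.map_nil, List.sum_cons, List.sum_nil]; omega)
          simp only [List.cons_append, List.nil_append] at hmain ⊢
          rw [hmain]
          rw [hmm]
          simp only [solsF]
          rw [if_neg hz, if_pos hx, if_pos hcond, r1, r2, r3]
          simp
        · -- children [c1, c2]
          have h2 := inv_c2 x y z hI hx
          have he2 : (P + 1 - (2*x+2*y+3*z)).toNat ≤ mm := by have := h2.2; omega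
          have hb2 : costT (2*x+y+2*z, x+2*y+2*z, 2*x+2*y+3*z) P ≤ 4 ^ mm :=
            Nat.pow_le_pow_right (by norm_num) he2
          have r2 : solsF mm (2*x+y+2*z) (x+2*y+2*z) (2*x+2*y+3*z) P
                  = solsF ((P + 1 - (2*x+2*y+3*z)).toNat) (2*x+y+2*z) (x+2*y+2*z) (2*x+2*y+3*z) P :=
            solsF_mono mm _ _ _ _ _ _ h2.1 he2 (by omega) (by omega)
          rw [if_neg hcond, if_pos hx]
          have hmain := main [(-2*x+y+2*z, -x+2*y+2*z, -2*x+2*y+3*z), (2*x+y+2*z, x+2*y+2*z, 2*x+2*y+3*z)]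
              (by intro t ht
                  simp only [List.mem_cons, List.not_mem_nil, or_false] at ht
                  rcases ht with h | h <;> subst h
                  · exact h1.1
                  · exact h2.1)
              (by simp only [List.map_cons, List.map_nil, List.sum_cons, List.sum_nil]; omega)
          simp only [List.cons_append, List.nil_append] at hmain ⊢
          rw [hmain]
          rw [hmm]
          simp only [solsF]
          rw [if_neg hz, if_pos hx, if_neg hcond, r1, r2]
          simp
        · -- children [c1, c3]
          rw [if_pos hcond, if_neg hx]
          have hmain := main [(-2*x+y+2*z, -x+2*y+2*z, -2*x+2*y+3*z), (x-2*y+2*z, 2*x-y+2*z, 2*x-2*y+3*z)]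
              (by intro t ht
                  simp only [List.mem_cons, List.not_mem_nil, or_false] at ht
                  rcases ht with h | h <;> subst h
                  · exact h1.1
                  · exact h3.1)
              (by simp only [List.map_cons, List.map_nil, List.sum_cons, List.sum_nil]; omega)
          simp only [List.cons_append, List.nil_append] at hmain ⊢
          rw [hmain]
          rw [hmm]
          simp only [solsF]
          rw [if_neg hz, if_neg hx, if_pos hcond, r1, r3]
          simp
        · -- children [c1]
          rw [if_neg hcond, if_neg hx]
          have hmain := main [(-2*x+y+2*z, -x+2*y+2*z, -2*x+2*y+3*z)]
              (by intro t ht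
                  simp only [List.mem_cons, List.not_mem_nil, or_false] at ht
                  subst ht; exact h1.1)
              (by simp only [List.map_cons, List.map_nil, List.sum_cons, List.sum_nil]; omega)
          simp only [List.cons_append, List.nil_append] at hmain ⊢
          rw [hmain]
          rw [hmm]
          simp only [solsF]
          rw [if_neg hz, if_neg hx, if_neg hcond, r1]
          simp

theorem sols_spec : Claim_equal_sols := by
  unfold Claim_equal_sols Spec_sols
  intro a b c P _ hpre
  unfold sols sols_alt
  rw [loopB_spec _ [(a, b, c)] P []
      (by intro t ht; simp at ht; subst ht; exact hpre) (by simp [costT])]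
  simp
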